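-- pv_equiv track=rewrite | github.com/Sigmanificient/codewars | src/python/katas/py6kyu/alphaber_war_airstrike_letters_massacre.py | alphabet_war
-- ===== SOURCE A (Python) =====
-- RESULT_LEFT = "Left side wins"
--
-- RESULT_RIGHT = "Right side wins"
--
-- RESULT_DRAW = "Let's fight again!"
--
-- def alphabet_war(fight: str) -> str:
--     warriors = 'wpbs*zdqm'
--     survivors = []
--
--     size = len(fight) - 1
--     for c, char in enumerate(fight):
--         if char == '*':
--             continue
--
--         if c and fight[c - 1] == '*':
--             continue
--
--         if c < size and fight[c + 1] == '*':
--             continue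
--
--         survivors.append(char)
--
--     point = sum((warriors.index(w) - 4) for w in survivors if w in warriors)
--     if not point:
--         return RESULT_DRAW
--
--     return RESULT_LEFT if point > 0 else RESULT_RIGHT
-- ===== SOURCE B (Python) =====
-- RESULT_LEFT = "Left side wins"
--
-- RESULT_RIGHT = "Right side wins"
--
-- RESULT_DRAW = "Let's fight again!"
--
--
-- def alphabet_war(fight: str) -> str:
--     # stage 1: cut the battlefield into '*'-free segments
--     segments = []
--     current = ''
--     for ch in fight:
--         if ch == '*':
--             segments.append(current)
--             current = ''
--         else:
--             current += ch
--     segments.append(current)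
--     # stage 2: trim the blast-adjacent end(s) of each segment and score the rest
--     last = len(segments) - 1
--     total = 0
--     for k, seg in enumerate(segments):
--         if k > 0:
--             seg = seg[1:]
--         if k < last:
--             seg = seg[:-1]
--         for ch in seg:
--             if ch in 'sbpw':
--                 total -= 'sbpw'.index(ch) + 1
--             elif ch in 'zdqm':
--                 total += 'zdqm'.index(ch) + 1
--     if total > 0:
--         return RESULT_LEFT
--     if total < 0:
--         return RESULT_RIGHT
--     return RESULT_DRAW
-- ===== Notes on version B (the rewrite author's own statement) =====
-- stated objective: alternative
-- what changed: Replaces A's single indexed pass that peeks at fight[c-1]/fight[c+1] for every character by a staged segmentation strategy: first cut the string into explosion-free segments, then trim the blast-facing first/last character of each segment by its position in the segment list, and score the remaining characters with two small side-specific rosters.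
import Mathlib
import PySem

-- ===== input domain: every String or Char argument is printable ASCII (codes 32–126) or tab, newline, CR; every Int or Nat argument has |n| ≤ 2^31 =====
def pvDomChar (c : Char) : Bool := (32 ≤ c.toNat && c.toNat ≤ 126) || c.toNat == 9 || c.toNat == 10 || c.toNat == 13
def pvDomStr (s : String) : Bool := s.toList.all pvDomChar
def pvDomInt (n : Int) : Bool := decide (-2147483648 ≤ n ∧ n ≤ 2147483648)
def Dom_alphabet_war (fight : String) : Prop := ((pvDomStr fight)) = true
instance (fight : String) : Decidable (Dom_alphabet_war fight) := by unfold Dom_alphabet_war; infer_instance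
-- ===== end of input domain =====

-- B replaces A's single neighbour-peeking indexed pass by a staged segment
-- strategy: split the string into explosion-free segments, trim the blast-facing
-- end of each segment, and score what is left (objective: alternative, same cost).

-- ===== PORT A =====
def alphabet_war (fight : String) : String :=
  let warriors : List Char := "wpbs*zdqm".toList
  let cs := fight.toList
  let size : Int := (cs.length : Int) - 1
  let survivors : List Char := (PySem.List.enumerate cs).foldl (fun acc p =>
    if p.2 = '*' then acc
    else if p.1 ≠ 0 ∧ PySem.List.pyGetD cs (p.1 - 1) ' ' = '*' then acc
    else if p.1 < size ∧ PySem.List.pyGetD cs (p.1 + 1) ' ' = '*' then acc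
    else acc ++ [p.2]) []
  let point : Int := (survivors.filter (fun w => warriors.contains w)).foldl
    (fun acc w => acc + (((PySem.List.index? warriors w).getD 0 : Int) - 4)) 0
  if point = 0 then "Let's fight again!"
  else if point > 0 then "Left side wins"
  else "Right side wins"

-- ===== PORT B =====
def alphabet_war_alt (fight : String) : String :=
  let cs := fight.toList
  -- stage 1: cut the battlefield into '*'-free segments
  let st : List (List Char) × List Char := cs.foldl (fun st ch =>
      if ch = '*' then (st.1 ++ [st.2], ([] : List Char)) else (st.1, st.2 ++ [ch])) ([], [])
  let segments : List (List Char) := st.1 ++ [st.2]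
  -- stage 2: trim the blast-adjacent end(s) of each segment and score the rest
  let last : Int := (segments.length : Int) - 1
  let total : Int := (PySem.List.enumerate segments).foldl (fun acc q =>
      let seg1 := if q.1 > 0 then PySem.List.slice q.2 (some 1) none else q.2
      let seg2 := if q.1 < last then PySem.List.slice seg1 none (some (-1)) else seg1
      seg2.foldl (fun a ch =>
        if ("sbpw".toList).contains ch then
          a - (((PySem.List.index? "sbpw".toList ch).getD 0 : Int) + 1)
        else if ("zdqm".toList).contains ch then
          a + (((PySem.List.index? "zdqm".toList ch).getD 0 : Int) + 1)
        else a) acc) 0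
  if total > 0 then "Left side wins"
  else if total < 0 then "Right side wins"
  else "Let's fight again!"

-- ===== PRECONDITION & SPEC =====
def Spec_alphabet_war (fight : String) (out : String) : Prop := out = alphabet_war_alt fight
instance (fight : String) (out : String) : Decidable (Spec_alphabet_war fight out) := by unfold Spec_alphabet_war; infer_instance

-- ===== CLAIM (what is proved, stated in full; the proofs are below) =====
def Claim_equal_alphabet_war : Prop := ∀ (fight : String), Dom_alphabet_war fight → Spec_alphabet_war fight (alphabet_war fight)

-- ===== LEMMAS AND PROOFS =====

-- the weight B's inner scoring loop adds for one surviving character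
def pvWt (c : Char) : Int :=
  if ("sbpw".toList).contains c then -(((PySem.List.index? "sbpw".toList c).getD 0 : Int) + 1)
  else if ("zdqm".toList).contains c then ((PySem.List.index? "zdqm".toList c).getD 0 : Int) + 1
  else 0

-- recursive specification of the whole battle: p = "the previous character was '*'"
def pvG : Bool → List Char → Int
  | _, [] => 0
  | p, c :: rest =>
      (if c ≠ '*' ∧ p = false ∧ rest.headD '.' ≠ '*' then pvWt c else 0) + pvG (c == '*') rest

-- reference form of B's stage-1 segmentation
def pvSplitStar : List Char → List Char → List (List Char)
  | cur, [] => [cur]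
  | cur, c :: rest => if c = '*' then cur :: pvSplitStar [] rest else pvSplitStar (cur ++ [c]) rest

def pvLT (first : Bool) (s : List Char) : List Char := if first then s else s.drop 1
def pvRT (b : Bool) (s : List Char) : List Char := if b then s.dropLast else s

-- reference form of B's stage-2 trim-and-score pass: first = "leftmost segment"
def pvH : Bool → List (List Char) → Int
  | _, [] => 0
  | first, [seg] => ((pvLT first seg).map pvWt).sum
  | first, seg :: rest => (((pvLT first seg).dropLast).map pvWt).sum + pvH false rest

theorem pv_sum_map_filter {α : Type} (l : List α) (p : α → Bool) (g : α → Int) :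
    ((l.filter p).map g).sum = (l.map (fun x => if p x then g x else 0)).sum := by
  induction l with
  | nil => simp
  | cons a l ih => by_cases h : p a = true <;> simp [h, ih]

theorem pv_char_weight (ch : Char) (hch : ch ≠ '*') :
    (if ("wpbs*zdqm".toList).contains ch = true
      then ((PySem.List.index? "wpbs*zdqm".toList ch).getD 0 : Int) - 4 else 0)
      = pvWt ch := by
  by_cases h : ch ∈ "wpbs*zdqm".toList
  · have h' : ch = 'w' ∨ ch = 'p' ∨ ch = 'b' ∨ ch = 's' ∨ ch = '*' ∨ ch = 'z' ∨ ch = 'd' ∨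
        ch = 'q' ∨ ch = 'm' := by simpa using h
    rcases h' with h' | h' | h' | h' | h' | h' | h' | h' | h' <;> subst h' <;> first
    | exact absurd rfl hch
    | decide
  · rw [if_neg (by simpa using h)]
    simp at h
    obtain ⟨h1, h2, h3, h4, -, h5, h6, h7, h8⟩ := h
    simp [pvWt, h1, h2, h3, h4, h5, h6, h7, h8]

-- A's per-index survivor condition summed in order equals the recursive spec pvG
theorem pv_apoint_g (fx : List Char) : ∀ (suffix : List Char) (k : Nat), fx.drop k = suffix →
    ((PySem.List.enumerate suffix (k : Int)).map (fun p =>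
        if (¬ p.2 = '*' ∧ ¬ (p.1 ≠ 0 ∧ PySem.List.pyGetD fx (p.1 - 1) ' ' = '*') ∧
            ¬ (p.1 < (fx.length : Int) - 1 ∧ PySem.List.pyGetD fx (p.1 + 1) ' ' = '*'))
          then pvWt p.2 else 0)).sum
    = pvG (decide (k ≠ 0 ∧ PySem.List.pyGetD fx ((k : Int) - 1) ' ' = '*')) suffix := by
  intro suffix
  induction suffix with
  | nil => intro k hk; simp [PySem.List.enumerate_nil, pvG]
  | cons c rest ih =>
    intro k hk
    have hklt : k < fx.length := by
      by_contra hge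
      rw [List.drop_eq_nil_of_le (by omega)] at hk
      exact List.cons_ne_nil c rest hk.symm
    have hc : fx.getD k ' ' = c := by
      rw [List.getD_eq_getElem fx ' ' hklt]
      have h0 : (fx.drop k).head (by simp [hk]) = c := by simp [hk]
      rwa [List.head_drop] at h0
    have hrest : fx.drop (k + 1) = rest := by
      rw [← List.drop_drop, hk]; simp
    have hnext : ∀ d : Char, k + 1 < fx.length → fx.getD (k + 1) d = rest.headD d := by
      intro d hlt
      rw [List.getD_eq_getElem fx d hlt]
      cases hr : rest with
      | nil =>
        exfalso
        rw [hr] at hrest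
        have := congrArg List.length hrest
        simp at this
        omega
      | cons r rs =>
        rw [hr] at hrest
        have h0 : (fx.drop (k + 1)).head (by rw [hrest]; simp) = r := by simp [hrest]
        rw [List.head_drop] at h0
        simp [h0]
    have hlen : rest.length = fx.length - (k + 1) := by
      rw [← hrest, List.length_drop]
    rw [PySem.List.enumerate_cons, List.map_cons, List.sum_cons,
      show ((k : Int) + 1) = ((k + 1 : Nat) : Int) by push_cast; ring, ih (k + 1) hrest]
    have hflag : (decide ((k + 1) ≠ 0 ∧ PySem.List.pyGetD fx (((k + 1 : Nat) : Int) - 1) ' ' = '*'))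
        = (c == '*') := by
      rw [show (((k + 1 : Nat) : Int) - 1) = ((k : Nat) : Int) by push_cast; ring,
        PySem.List.pyGetD_natCast, hc]
      cases hb : (c == '*') <;> simp_all
    rw [hflag]
    congr 1
    have hprev : (¬ ((k : Int) ≠ 0 ∧ PySem.List.pyGetD fx ((k : Int) - 1) ' ' = '*')) ↔
        ((decide (k ≠ 0 ∧ PySem.List.pyGetD fx ((k : Int) - 1) ' ' = '*')) = false) := by
      simp
    have hnextiff : (¬ ((k : Int) < (fx.length : Int) - 1 ∧
        PySem.List.pyGetD fx ((k : Int) + 1) ' ' = '*')) ↔ rest.headD '.' ≠ '*' := by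
      by_cases hlt : k + 1 < fx.length
      · have hA : (k : Int) < (fx.length : Int) - 1 := by omega
        rw [show ((k : Int) + 1) = ((k + 1 : Nat) : Int) by push_cast; ring,
          PySem.List.pyGetD_natCast, hnext ' ' hlt]
        cases rest with
        | nil => exfalso; simp at hlen; omega
        | cons r rs => simp [hA]
      · have hrnil : rest = [] := by
          cases rest with
          | nil => rfl
          | cons r rs => simp at hlen; omega
        subst hrnil
        simp
        intro h; omega
    exact if_congr (and_congr Iff.rfl (and_congr hprev hnextiff)) rfl rfl

-- B's inner scoring loop adds the pvWt-sum of its segment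
theorem pv_inner_fold (seg : List Char) : ∀ a : Int,
    seg.foldl (fun a ch =>
        if ("sbpw".toList).contains ch then
          a - (((PySem.List.index? "sbpw".toList ch).getD 0 : Int) + 1)
        else if ("zdqm".toList).contains ch then
          a + (((PySem.List.index? "zdqm".toList ch).getD 0 : Int) + 1)
        else a) a = a + (seg.map pvWt).sum := by
  induction seg with
  | nil => intro a; simp
  | cons c rest ih =>
    intro a
    rw [List.foldl_cons, ih, List.map_cons, List.sum_cons]
    unfold pvWt
    split_ifs <;> ring

-- B's trim-and-score of the enumerated segment list equals pvH
theorem pv_elem (last : Int) : ∀ (L : List (List Char)) (k0 : Nat),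
    last = (k0 : Int) + L.length - 1 →
    ((PySem.List.enumerate L (k0 : Int)).map (fun q =>
        ((pvRT (decide (q.1 < last)) (pvLT (decide (¬ q.1 > 0)) q.2)).map pvWt).sum)).sum
    = pvH (k0 == 0) L := by
  intro L
  induction L with
  | nil => intro k0 h; simp [PySem.List.enumerate_nil, pvH]
  | cons seg rest ih =>
    intro k0 h
    rw [PySem.List.enumerate_cons, List.map_cons, List.sum_cons,
      show ((k0 : Int) + 1) = ((k0 + 1 : Nat) : Int) by push_cast; ring]
    cases rest with
    | nil =>
      simp only [PySem.List.enumerate_nil, List.map_nil, List.sum_nil, add_zero]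
      simp only [List.length_cons, List.length_nil] at h
      have hlast : (decide ((k0 : Int) < last)) = false := by
        simp only [decide_eq_false_iff_not]; push_cast at h; omega
      rw [hlast]
      rcases Nat.eq_zero_or_pos k0 with h0 | h0
      · subst h0
        simp [pvH, pvRT, pvLT]
      · have hb : (k0 == 0) = false := by simp; omega
        have hf : (decide (¬ (k0 : Int) > 0)) = false := by simp; omega
        rw [hb, hf]
        simp [pvH, pvRT, pvLT]
    | cons r rs =>
      rw [ih (k0 + 1) (by push_cast at h ⊢; simp at h ⊢; omega)]
      have h1 : ((k0 + 1 : Nat) == 0) = false := by simp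
      rw [h1]
      have hlast : (decide ((k0 : Int) < last)) = true := by
        simp only [decide_eq_true_eq, List.length_cons] at *; push_cast at h; omega
      rw [hlast]
      rcases Nat.eq_zero_or_pos k0 with h0 | h0
      · subst h0
        simp [pvH, pvRT, pvLT]
      · have hb : (k0 == 0) = false := by simp; omega
        have hf : (decide (¬ (k0 : Int) > 0)) = false := by simp; omega
        rw [hb, hf]
        simp [pvH, pvRT, pvLT]

theorem pv_split_ne_nil : ∀ (cs cur : List Char), pvSplitStar cur cs ≠ [] := by
  intro cs
  induction cs with
  | nil => intro cur; simp [pvSplitStar]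
  | cons c rest ih =>
    intro cur
    by_cases hc : c = '*' <;> simp [pvSplitStar, hc, ih]

-- B's stage-1 fold computes pvSplitStar
theorem pv_segments (cs : List Char) : ∀ (segs : List (List Char)) (cur : List Char),
    ((cs.foldl (fun st ch =>
        if ch = '*' then (st.1 ++ [st.2], ([] : List Char)) else (st.1, st.2 ++ [ch]))
        (segs, cur)).1
      ++ [(cs.foldl (fun st ch =>
        if ch = '*' then (st.1 ++ [st.2], ([] : List Char)) else (st.1, st.2 ++ [ch]))
        (segs, cur)).2])
    = segs ++ pvSplitStar cur cs := by
  induction cs with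
  | nil => intro segs cur; simp [pvSplitStar]
  | cons c rest ih =>
    intro segs cur
    by_cases hc : c = '*'
    · simp only [List.foldl_cons, hc, pvSplitStar, ih]
      simp
    · simp only [List.foldl_cons, pvSplitStar, ih, hc]
      simp

-- scoring the trimmed segments of pvSplitStar equals the recursive spec pvG
theorem pvH_one (first : Bool) (seg : List Char) :
    pvH first [seg] = ((pvLT first seg).map pvWt).sum := rfl

theorem pvH_cons2 (first : Bool) (seg l : List Char) (ls : List (List Char)) :
    pvH first (seg :: l :: ls) = (((pvLT first seg).dropLast).map pvWt).sum + pvH false (l :: ls) := rfl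

theorem pv_h_g : ∀ (cs : List Char) (first : Bool) (pending : List Char),
    pvH first (pvSplitStar pending cs) =
      ((pvRT (cs.headD '.' == '*') (pvLT first pending)).map pvWt).sum
        + pvG (pending.isEmpty && !first) cs := by
  intro cs
  induction cs with
  | nil =>
    intro first pending
    simp [pvSplitStar, pvG, pvRT, pvH_one]
  | cons c rest ih =>
    intro first pending
    by_cases hc : c = '*'
    · subst hc
      obtain ⟨l, ls, hL⟩ : ∃ l ls, pvSplitStar ([] : List Char) rest = l :: ls := by
        cases hE : pvSplitStar ([] : List Char) rest with
        | nil => exact absurd hE (pv_split_ne_nil rest [])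
        | cons l ls => exact ⟨l, ls, rfl⟩
      have hrec := ih false []
      rw [hL] at hrec
      have hstep : pvSplitStar pending ('*' :: rest) = pending :: pvSplitStar [] rest := by
        simp [pvSplitStar]
      rw [hstep, hL, pvH_cons2, hrec]
      simp [pvG, pvLT, pvRT]
    · simp only [pvSplitStar, if_neg hc, ih first (pending ++ [c])]
      simp only [pvG, List.headD_cons]
      have hflag : ((pending ++ [c]).isEmpty && !first) = false := by simp
      rw [hflag, show (c == '*') = false by simp [hc]]
      have hkey : ((pvRT (rest.headD '.' == '*') (pvLT first (pending ++ [c]))).map pvWt).sum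
          = ((pvRT false (pvLT first pending)).map pvWt).sum
            + (if c ≠ '*' ∧ (pending.isEmpty && !first) = false ∧ rest.headD '.' ≠ '*'
                then pvWt c else 0) := by
        cases first with
        | true =>
          cases hB : (rest.headD '.' == '*') with
          | false =>
            have hB' : rest.head?.getD '.' ≠ '*' := by simpa using hB
            simp [pvLT, pvRT, hc, hB']
          | true =>
            have hB' : rest.head?.getD '.' = '*' := by simpa using hB
            simp [pvLT, pvRT, hc, hB']
        | false =>
          cases pending with
          | nil =>
            cases hB : (rest.headD '.' == '*') with
            | false =>
              have hB' : rest.head?.getD '.' ≠ '*' := by simpa using hB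
              simp [pvLT, pvRT, hB']
            | true =>
              have hB' : rest.head?.getD '.' = '*' := by simpa using hB
              simp [pvLT, pvRT, hB']
          | cons q qs =>
            cases hB : (rest.headD '.' == '*') with
            | false =>
              have hB' : rest.head?.getD '.' ≠ '*' := by simpa using hB
              simp [pvLT, pvRT, hc, hB']
            | true =>
              have hB' : rest.head?.getD '.' = '*' := by simpa using hB
              simp [pvLT, pvRT, hc, hB']
      rw [hkey]
      ring

-- A's whole point computation equals pvG false
theorem pv_point_eq (cs : List Char) :
    (((PySem.List.enumerate cs).foldl (fun acc p =>
        if p.2 = '*' then acc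
        else if p.1 ≠ 0 ∧ PySem.List.pyGetD cs (p.1 - 1) ' ' = '*' then acc
        else if p.1 < (cs.length : Int) - 1 ∧ PySem.List.pyGetD cs (p.1 + 1) ' ' = '*' then acc
        else acc ++ [p.2]) []).filter (fun w => ("wpbs*zdqm".toList).contains w)).foldl
      (fun acc w => acc + (((PySem.List.index? "wpbs*zdqm".toList w).getD 0 : Int) - 4)) 0
    = pvG false cs := by
  have hsurv : (PySem.List.enumerate cs).foldl (fun acc p =>
        if p.2 = '*' then acc
        else if p.1 ≠ 0 ∧ PySem.List.pyGetD cs (p.1 - 1) ' ' = '*' then acc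
        else if p.1 < (cs.length : Int) - 1 ∧ PySem.List.pyGetD cs (p.1 + 1) ' ' = '*' then acc
        else acc ++ [p.2]) []
      = (PySem.List.enumerate cs).foldl (fun acc p =>
        if (¬ p.2 = '*' ∧ ¬ (p.1 ≠ 0 ∧ PySem.List.pyGetD cs (p.1 - 1) ' ' = '*') ∧
            ¬ (p.1 < (cs.length : Int) - 1 ∧ PySem.List.pyGetD cs (p.1 + 1) ' ' = '*'))
          then acc ++ [p.2] else acc) [] :=
    PySem.List.foldl_congr_mem _ _ _ _ (by intro acc p _; split_ifs <;> tauto)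
  rw [hsurv]
  rw [PySem.List.foldl_append_ite, PySem.List.foldl_add]
  simp only [List.nil_append, List.filter_map, pv_sum_map_filter, List.map_map, zero_add]
  have hfin := pv_apoint_g cs cs 0 (by simp)
  refine Eq.trans (congrArg List.sum (List.map_congr_left ?_)) (by simpa using hfin)
  intro p hp
  simp only [Function.comp]
  by_cases hP : (¬ p.2 = '*' ∧ ¬ (p.1 ≠ 0 ∧ PySem.List.pyGetD cs (p.1 - 1) ' ' = '*') ∧
      ¬ (p.1 < (cs.length : Int) - 1 ∧ PySem.List.pyGetD cs (p.1 + 1) ' ' = '*'))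
  · have h2 : (¬ p.2 = '*' ∧ (¬ p.1 = 0 → ¬ PySem.List.pyGetD cs (p.1 - 1) ' ' = '*') ∧
        (p.1 < (cs.length : Int) - 1 → ¬ PySem.List.pyGetD cs (p.1 + 1) ' ' = '*')) := by
      tauto
    rw [decide_eq_true hP, if_pos h2, ← pv_char_weight p.2 hP.1]
    simp
  · have h2 : ¬ (¬ p.2 = '*' ∧ (¬ p.1 = 0 → ¬ PySem.List.pyGetD cs (p.1 - 1) ' ' = '*') ∧
        (p.1 < (cs.length : Int) - 1 → ¬ PySem.List.pyGetD cs (p.1 + 1) ' ' = '*')) := by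
      tauto
    rw [decide_eq_false hP, if_neg h2]
    simp

-- ===== VERDICT (by name: the statement is the Claim_ definition above) =====
theorem alphabet_war_spec : Claim_equal_alphabet_war := by
  intro fight _
  unfold Spec_alphabet_war alphabet_war alphabet_war_alt
  simp only []
  rw [pv_point_eq fight.toList]
  have hseg := pv_segments fight.toList [] []
  simp only [List.nil_append] at hseg
  rw [hseg]
  have htot : (PySem.List.enumerate (pvSplitStar [] fight.toList)).foldl (fun acc q =>
      (if q.1 < ((pvSplitStar [] fight.toList).length : Int) - 1
        then PySem.List.slice (if q.1 > 0 then PySem.List.slice q.2 (some 1) none else q.2)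
          none (some (-1))
        else (if q.1 > 0 then PySem.List.slice q.2 (some 1) none else q.2)).foldl
        (fun a ch =>
          if ("sbpw".toList).contains ch then
            a - (((PySem.List.index? "sbpw".toList ch).getD 0 : Int) + 1)
          else if ("zdqm".toList).contains ch then
            a + (((PySem.List.index? "zdqm".toList ch).getD 0 : Int) + 1)
          else a) acc) 0 = pvH true (pvSplitStar [] fight.toList) := by
    refine Eq.trans (PySem.List.foldl_congr_mem _ _
      (fun (acc : Int) (q : Int × List Char) => acc +
        (((pvRT (decide (q.1 < ((pvSplitStar [] fight.toList).length : Int) - 1))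
          (pvLT (decide (¬ q.1 > 0)) q.2)).map pvWt).sum)) _ ?_) ?_
    · intro acc q _
      rw [pv_inner_fold]
      congr 1
      simp only [pvRT, pvLT, PySem.List.slice_to_neg_one, PySem.List.slice_from_one]
      by_cases h1 : q.1 > 0 <;>
        by_cases h2 : q.1 < ((pvSplitStar [] fight.toList).length : Int) - 1 <;>
        simp [h1, h2]
    · rw [PySem.List.foldl_add]
      have := pv_elem (((pvSplitStar [] fight.toList).length : Int) - 1)
        (pvSplitStar [] fight.toList) 0 (by simp)
      rw [zero_add]
      exact this
  rw [htot]
  have hhg := pv_h_g fight.toList true []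
  have hG : pvH true (pvSplitStar [] fight.toList) = pvG false fight.toList := by
    rw [hhg]; cases hB : (fight.toList.headD '.' == '*') <;> simp [pvLT, pvRT]
  rw [hG]
  split_ifs with h1 h2 h3 h4 <;> first | rfl | omega
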